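-- pv_equiv track=rewrite | github.com/shikhasrivastava0574-afk/mental-health-chatbot | app.py | crisis_detection
-- ===== SOURCE A (Python) =====
-- def crisis_detection(text):
--
--     crisis_words = [
--     "kill myself",
--     "suicide",
--     "want to die",
--     "end my life"
--     ]
--
--     for word in crisis_words:
--         if word in text.lower():
--             return True
--
--     return False
-- ===== SOURCE B (Python) =====
-- def crisis_detection(text):
--     phrases = ("kill myself", "suicide", "want to die", "end my life")
--     t = text.lower()
--     for i in range(len(t) + 1):
--         if any(t.startswith(p, i) for p in phrases):
--             return True
--     return False
-- ===== Notes on version B (the rewrite author's own statement) =====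
-- stated objective: alternative
-- what changed: Replaces four independent substring scans with early return by a single left-to-right scan that checks at each position whether any crisis phrase starts there.
import Mathlib
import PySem

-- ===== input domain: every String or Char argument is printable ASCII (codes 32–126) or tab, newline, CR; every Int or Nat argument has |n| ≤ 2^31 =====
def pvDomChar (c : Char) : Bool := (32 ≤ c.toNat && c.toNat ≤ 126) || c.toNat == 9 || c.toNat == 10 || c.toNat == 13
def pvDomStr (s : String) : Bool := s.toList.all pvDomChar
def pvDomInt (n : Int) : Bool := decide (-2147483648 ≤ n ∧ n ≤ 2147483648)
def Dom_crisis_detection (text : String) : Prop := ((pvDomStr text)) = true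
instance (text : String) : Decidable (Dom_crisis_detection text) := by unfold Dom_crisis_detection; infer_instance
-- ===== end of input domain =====

-- B replaces A's four independent substring scans (early return) by one left-to-right
-- scan checking at each position whether any phrase starts there (objective: alternative).

-- ===== PORT A =====
-- the early-return loop `for word in crisis_words: if word in text.lower(): return True`
def crisisLoopA (t : String) : List String → Bool
  | [] => false
  | w :: ws => if PySem.Str.isIn w t then true else crisisLoopA t ws

def crisis_detection (text : String) : Bool :=
  crisisLoopA (PySem.Str.lower text) ["kill myself", "suicide", "want to die", "end my life"]

-- ===== PORT B =====
-- `for i in range(len(t)+1): if any(t.startswith(p, i) ...): return True`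
-- realised as structural recursion over the suffixes of the lowered text
def scanHitB (phrases : List (List Char)) : List Char → Bool
  | [] => phrases.any (fun p => p.isPrefixOf [])
  | c :: rest =>
      if phrases.any (fun p => p.isPrefixOf (c :: rest)) then true
      else scanHitB phrases rest

def crisis_detection_alt (text : String) : Bool :=
  scanHitB ["kill myself".toList, "suicide".toList, "want to die".toList, "end my life".toList]
    (PySem.Chars.lower text.toList)

-- ===== PRECONDITION & SPEC =====
def Spec_crisis_detection (text : String) (out : Bool) : Prop := out = crisis_detection_alt text
instance (text : String) (out : Bool) : Decidable (Spec_crisis_detection text out) := by unfold Spec_crisis_detection; infer_instance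

-- ===== CLAIM (what is proved, stated in full; the proofs are below) =====
def Claim_equal_crisis_detection : Prop := ∀ (text : String), Dom_crisis_detection text → Spec_crisis_detection text (crisis_detection text)

-- ===== LEMMAS AND PROOFS =====

theorem crisisLoopA_eq_any (t : String) (ws : List String) :
    crisisLoopA t ws = ws.any (fun w => PySem.Str.isIn w t) := by
  induction ws with
  | nil => rfl
  | cons w ws ih => simp [crisisLoopA, ih]

theorem scanHitB_iff (ps : List (List Char)) (l : List Char) :
    scanHitB ps l = true ↔ ∃ p ∈ ps, p <:+: l := by
  induction l with
  | nil =>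
    simp [scanHitB, List.any_eq_true, List.isPrefixOf_iff_prefix]
  | cons c rest ih =>
    simp only [scanHitB]
    split_ifs with h
    · simp only [true_iff]
      simp only [List.any_eq_true, List.isPrefixOf_iff_prefix] at h
      obtain ⟨p, hp, hpre⟩ := h
      exact ⟨p, hp, hpre.isInfix⟩
    · rw [ih]
      simp only [List.any_eq_true, List.isPrefixOf_iff_prefix] at h
      push Not at h
      constructor
      · rintro ⟨p, hp, hinf⟩; exact ⟨p, hp, List.infix_cons_iff.mpr (Or.inr hinf)⟩
      · rintro ⟨p, hp, hinf⟩
        rcases List.infix_cons_iff.mp hinf with hpre | hinf'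
        · exact absurd hpre (h p hp)
        · exact ⟨p, hp, hinf'⟩

-- ===== VERDICT (by name: the statement is the Claim_ definition above) =====
theorem crisis_detection_spec : Claim_equal_crisis_detection := by
  intro text _
  unfold Spec_crisis_detection crisis_detection crisis_detection_alt
  rw [crisisLoopA_eq_any]
  rw [Bool.eq_iff_iff, scanHitB_iff]
  simp only [List.any_eq_true, PySem.Str.isIn_eq, PySem.Str.toList_lower,
    PySem.Chars.isIn_iff_infix, List.mem_cons]
  constructor
  · rintro ⟨w, hw, hin⟩
    rcases hw with rfl | rfl | rfl | rfl | h
    · exact ⟨"kill myself".toList, by simp, hin⟩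
    · exact ⟨"suicide".toList, by simp, hin⟩
    · exact ⟨"want to die".toList, by simp, hin⟩
    · exact ⟨"end my life".toList, by simp, hin⟩
    · cases h
  · rintro ⟨p, hp, hin⟩
    rcases hp with rfl | rfl | rfl | rfl | h
    · exact ⟨"kill myself", by simp, hin⟩
    · exact ⟨"suicide", by simp, hin⟩
    · exact ⟨"want to die", by simp, hin⟩
    · exact ⟨"end my life", by simp, hin⟩
    · cases h
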